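-- pv_equiv track=rewrite | github.com/oxygenxml/dita-refactoring-examples | 46 Topic titles to File Names/renameFileUsingTitle.py | removeDuplicateValues
-- ===== SOURCE A (Python) =====
-- def removeDuplicateValues(originalFileNameToNewFileNameMap):
--     valuesCounter = {}
--     fileNamesMapNoDuplicateVals = {}
--     for key, value in originalFileNameToNewFileNameMap.items():
--         if value in valuesCounter:
--             valuesCounter[value] += 1
--         else: valuesCounter[value] = 1
--     for key, value in originalFileNameToNewFileNameMap.items():
--         if valuesCounter[value] == 1:
--             fileNamesMapNoDuplicateVals[key] = value
--     return fileNamesMapNoDuplicateVals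
-- ===== SOURCE B (Python) =====
-- def removeDuplicateValues(originalFileNameToNewFileNameMap):
--     fileNamesMapNoDuplicateVals = {}
--     firstKeyForValue = {}
--     for key, value in originalFileNameToNewFileNameMap.items():
--         if value in firstKeyForValue:
--             earlierKey = firstKeyForValue[value]
--             if earlierKey is not None:
--                 del fileNamesMapNoDuplicateVals[earlierKey]
--                 firstKeyForValue[value] = None
--         else:
--             fileNamesMapNoDuplicateVals[key] = value
--             firstKeyForValue[value] = key
--     return fileNamesMapNoDuplicateVals
-- ===== Notes on version B (the rewrite author's own statement) =====
-- stated objective: alternative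
-- what changed: B makes a single online pass that inserts each entry optimistically and deletes it again when its value reappears (tracking the first owner of each value), replacing A's two staged passes (count all values, then re-scan and filter).
import Mathlib
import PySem

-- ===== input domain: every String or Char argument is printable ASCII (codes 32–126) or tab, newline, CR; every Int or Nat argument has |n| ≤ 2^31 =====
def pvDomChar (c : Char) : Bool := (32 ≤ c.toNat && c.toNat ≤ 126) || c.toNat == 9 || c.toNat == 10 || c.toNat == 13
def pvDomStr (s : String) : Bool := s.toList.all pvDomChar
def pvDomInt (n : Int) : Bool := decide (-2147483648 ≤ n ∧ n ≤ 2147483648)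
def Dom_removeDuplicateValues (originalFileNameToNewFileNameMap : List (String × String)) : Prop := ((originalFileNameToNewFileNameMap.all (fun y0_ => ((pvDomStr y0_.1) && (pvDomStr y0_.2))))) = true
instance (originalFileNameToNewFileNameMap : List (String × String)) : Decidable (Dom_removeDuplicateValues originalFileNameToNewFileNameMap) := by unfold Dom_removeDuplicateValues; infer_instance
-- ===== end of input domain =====

-- B replaces A's two staged passes (count every value, then re-scan the map and filter) by a
-- single online pass that inserts each entry optimistically and deletes it again when its value
-- reappears, tracking the first owner of each value (objective: alternative).

-- ===== PORT A =====
def removeDuplicateValues (originalFileNameToNewFileNameMap : List (String × String)) : List (String × String) :=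
  let valuesCounter : PySem.Dict String Int :=
    originalFileNameToNewFileNameMap.foldl
      (fun c kv =>
        if c.contains kv.2 then c.insert kv.2 (c.getD kv.2 0 + 1)   -- valuesCounter[value] += 1
        else c.insert kv.2 1)                                        -- valuesCounter[value] = 1
      PySem.Dict.empty
  let fileNamesMapNoDuplicateVals : PySem.Dict String String :=
    originalFileNameToNewFileNameMap.foldl
      (fun r kv => if valuesCounter.getD kv.2 0 == 1 then r.insert kv.1 kv.2 else r)
      PySem.Dict.empty
  fileNamesMapNoDuplicateVals.items

-- ===== PORT B =====
def removeDuplicateValues_alt (originalFileNameToNewFileNameMap : List (String × String)) : List (String × String) :=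
  (originalFileNameToNewFileNameMap.foldl
    (fun (st : PySem.Dict String String × PySem.Dict String (Option String)) kv =>
      if st.2.contains kv.2 then                                             -- if value in firstKeyForValue
        match st.2.getD kv.2 none with                                       -- earlierKey = firstKeyForValue[value]
        | some earlierKey => (st.1.erase earlierKey, st.2.insert kv.2 none)  -- del result[earlierKey]; firstKeyForValue[value] = None
        | none => st
      else (st.1.insert kv.1 kv.2, st.2.insert kv.2 (some kv.1)))            -- result[key] = value; firstKeyForValue[value] = key
    (PySem.Dict.empty, PySem.Dict.empty)).1.items

-- ===== PRECONDITION & SPEC =====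
-- Pre_ requires pairwise-distinct keys: the argument is a Python dict, whose keys are
-- necessarily distinct, so association lists with duplicate keys represent no actual input.
def Pre_removeDuplicateValues (originalFileNameToNewFileNameMap : List (String × String)) : Prop :=
  (originalFileNameToNewFileNameMap.map Prod.fst).Nodup
instance (originalFileNameToNewFileNameMap : List (String × String)) : Decidable (Pre_removeDuplicateValues originalFileNameToNewFileNameMap) := by unfold Pre_removeDuplicateValues; infer_instance

def pvWitness_removeDuplicateValues : (List (String × String)) :=
  [("a.dita", "intro"), ("b.dita", "intro"), ("c.dita", "setup")]

def Spec_removeDuplicateValues (originalFileNameToNewFileNameMap : List (String × String)) (out : List (String × String)) : Prop := out = removeDuplicateValues_alt originalFileNameToNewFileNameMap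
instance (originalFileNameToNewFileNameMap : List (String × String)) (out : List (String × String)) : Decidable (Spec_removeDuplicateValues originalFileNameToNewFileNameMap out) := by unfold Spec_removeDuplicateValues; infer_instance

-- ===== CLAIM (what is proved, stated in full; the proofs are below) =====
def Claim_equal_removeDuplicateValues : Prop := ∀ (originalFileNameToNewFileNameMap : List (String × String)), Dom_removeDuplicateValues originalFileNameToNewFileNameMap → Pre_removeDuplicateValues originalFileNameToNewFileNameMap → Spec_removeDuplicateValues originalFileNameToNewFileNameMap (removeDuplicateValues originalFileNameToNewFileNameMap)

-- ===== LEMMAS AND PROOFS =====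

-- B's loop body and initial state, named for the induction
def pvStep (st : PySem.Dict String String × PySem.Dict String (Option String))
    (kv : String × String) : PySem.Dict String String × PySem.Dict String (Option String) :=
  if st.2.contains kv.2 then
    match st.2.getD kv.2 none with
    | some earlierKey => (st.1.erase earlierKey, st.2.insert kv.2 none)
    | none => st
  else (st.1.insert kv.1 kv.2, st.2.insert kv.2 (some kv.1))

def pvInit : PySem.Dict String String × PySem.Dict String (Option String) :=
  (PySem.Dict.empty, PySem.Dict.empty)

-- the key of the unique entry carrying value v (meaningful when v occurs exactly once)
def pvKeyOf (m : List (String × String)) (v : String) : String :=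
  ((m.filter (fun kv => kv.2 == v)).map Prod.fst).headD ""

-- a conditional fold is a fold over the filtered list
theorem pv_foldl_ite_filter {α β : Type} (p : β → Bool) (f : α → β → α) (l : List β) (init : α) :
    l.foldl (fun a x => if p x then f a x else a) init = (l.filter p).foldl f init := by
  induction l generalizing init with
  | nil => rfl
  | cons x t ih =>
      by_cases h : p x = true
      · simp [h, ih]
      · simp [h, ih]

-- A's counter holds the value-occurrence counts
theorem pv_counter_getD (m : List (String × String)) (v : String) :
    (m.foldl
      (fun c kv =>
        if c.contains kv.2 then c.insert kv.2 (c.getD kv.2 0 + 1) else c.insert kv.2 1)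
      (PySem.Dict.empty : PySem.Dict String Int)).getD v 0 = ((m.map Prod.snd).count v : Int) := by
  have hfun : (fun (c : PySem.Dict String Int) (kv : String × String) =>
      if c.contains kv.2 then c.insert kv.2 (c.getD kv.2 0 + 1) else c.insert kv.2 1)
      = fun c kv => c.insert kv.2 (c.getD kv.2 0 + 1) := by
    funext c kv
    by_cases h : c.contains kv.2 = true
    · simp [h]
    · simp only [Bool.not_eq_true] at h
      rw [if_neg (by simp [h]), PySem.Dict.getD_of_not_contains _ _ h]
      norm_num
  have h2 : m.foldl (fun (c : PySem.Dict String Int) kv => c.insert kv.2 (c.getD kv.2 0 + 1)) PySem.Dict.empty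
      = (m.map Prod.snd).foldl (fun c x => c.insert x (c.getD x 0 + 1)) PySem.Dict.empty := by
    rw [List.foldl_map]
  rw [hfun, h2, PySem.Dict.getD_foldl_insert_add_one]
  simp [PySem.Dict.getD_empty]

-- count of v among the values after appending one entry
theorem pv_count_append (m : List (String × String)) (kv : String × String) (v : String) :
    ((m ++ [kv]).map Prod.snd).count v
      = (m.map Prod.snd).count v + (if kv.2 = v then 1 else 0) := by
  simp [List.count_append, List.count_singleton]

-- pvKeyOf is stable under appending an entry with a different value
theorem pv_keyOf_append_of_ne (m : List (String × String)) (kv : String × String) (v : String)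
    (h : kv.2 ≠ v) : pvKeyOf (m ++ [kv]) v = pvKeyOf m v := by
  simp [pvKeyOf, List.filter_append, h]

-- a value occurring once pins down its single entry
theorem pv_singleton_entry (m : List (String × String)) (v : String)
    (hcnt : (m.map Prod.snd).count v = 1) :
    ∃ e, m.filter (fun p => p.2 == v) = [e] := by
  have hlen : (m.filter (fun p => p.2 == v)).length = 1 := by
    rw [← hcnt]
    simp [List.count_eq_countP, List.countP_map, ← List.countP_eq_length_filter]
    rfl
  exact List.length_eq_one_iff.mp hlen

-- THE INVARIANT of B's single pass: after the fold, the result dict holds exactly the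
-- entries whose value occurs once (in order), and firstKeyForValue maps each seen value
-- to its unique owner (or None once the value is duplicated).
theorem pv_inv (m : List (String × String)) (h : (m.map Prod.fst).Nodup) :
    (m.foldl pvStep pvInit).1.items
        = m.filter (fun kv => (m.map Prod.snd).count kv.2 == 1)
    ∧ (∀ v, (m.foldl pvStep pvInit).2.contains v = decide (v ∈ m.map Prod.snd))
    ∧ (∀ v, (m.foldl pvStep pvInit).2.getD v none
        = if (m.map Prod.snd).count v = 1 then some (pvKeyOf m v) else none) := by
  revert h
  induction m using List.reverseRecOn with
  | nil =>
      intro _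
      refine ⟨rfl, ?_, ?_⟩ <;> intro v <;>
        simp [pvInit, PySem.Dict.contains_empty, PySem.Dict.getD_empty]
  | append_singleton t kv ih =>
      intro h
      rw [List.map_append, List.nodup_append] at h
      obtain ⟨ht, -, hdisj⟩ := h
      have hk1 : kv.1 ∉ t.map Prod.fst := fun hm => hdisj kv.1 hm kv.1 (by simp) rfl
      obtain ⟨ih1, ih2, ih3⟩ := ih ht
      have hfold : (t ++ [kv]).foldl pvStep pvInit = pvStep (t.foldl pvStep pvInit) kv := by
        rw [List.foldl_append]; rfl
      set s := t.foldl pvStep pvInit with hs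
      by_cases hmem : kv.2 ∈ t.map Prod.snd
      · by_cases hc1 : (t.map Prod.snd).count kv.2 = 1
        · -- value seen once before: erase its owner
          have hcont : s.2.contains kv.2 = true := by rw [ih2]; simpa using hmem
          have hget : s.2.getD kv.2 none = some (pvKeyOf t kv.2) := by
            rw [ih3]; simp [hc1]
          have hstep : pvStep s kv = (s.1.erase (pvKeyOf t kv.2), s.2.insert kv.2 none) := by
            simp [pvStep, hcont, hget]
          obtain ⟨e0, he0⟩ := pv_singleton_entry t kv.2 hc1
          have he0f : e0 ∈ t.filter (fun p => p.2 == kv.2) := by rw [he0]; simp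
          have he0m : e0 ∈ t := (List.mem_filter.mp he0f).1
          have he0v : e0.2 = kv.2 := by have := (List.mem_filter.mp he0f).2; simpa using this
          have hkey : pvKeyOf t kv.2 = e0.1 := by simp [pvKeyOf, he0]
          have hcnew : ((t ++ [kv]).map Prod.snd).count kv.2 = 2 := by
            rw [pv_count_append]; simp [hc1]
          rw [hfold, hstep]
          refine ⟨?_, ?_, ?_⟩
          · -- items after erase
            have herase : (s.1.erase (pvKeyOf t kv.2)).items
                = s.1.items.filter (fun p => !(p.1 == pvKeyOf t kv.2)) := rfl
            rw [herase, ih1, hkey, List.filter_append, List.filter_filter]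
            have h2 : [kv].filter (fun p => ((t ++ [kv]).map Prod.snd).count p.2 == 1) = [] := by
              simp
              omega
            rw [h2, List.append_nil]
            apply List.filter_congr
            intro p hp
            by_cases hpv : p.2 = kv.2
            · have hpe : p = e0 := by
                have : p ∈ t.filter (fun q => q.2 == kv.2) := by
                  simp [List.mem_filter, hp, hpv]
                rw [he0] at this; simpa using this
              simp [hpe, he0v, hc1]
            · have hpk : p.1 ≠ e0.1 := by
                intro he
                exact hpv (by rw [List.inj_on_of_nodup_map ht hp he0m he]; exact he0v)
              have hz : List.count p.2 [kv.2] = 0 := List.count_eq_zero.mpr (by simpa using hpv)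
              simp [hpk, hz]
          · intro v
            rw [PySem.Dict.contains_insert, ih2]
            by_cases hv : v = kv.2
            · subst hv
              simp [hmem]
            · simp only [List.map_append, List.map_cons, List.map_nil, List.mem_append,
                List.mem_singleton, Bool.decide_or, Bool.beq_eq_decide_eq]
              rw [decide_eq_false hv]
              simp [Bool.or_comm]
          · intro v
            rw [PySem.Dict.getD_insert]
            by_cases hv : v = kv.2
            · subst hv
              simp
              omega
            · have hcv : ((t ++ [kv]).map Prod.snd).count v = (t.map Prod.snd).count v := by
                rw [pv_count_append]; simp [Ne.symm hv]
              rw [if_neg hv, ih3, hcv, pv_keyOf_append_of_ne t kv v (Ne.symm hv)]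
        · -- value already duplicated: no change
          have hcont : s.2.contains kv.2 = true := by rw [ih2]; simpa using hmem
          have hget : s.2.getD kv.2 none = none := by rw [ih3]; simp [hc1]
          have hstep : pvStep s kv = s := by simp [pvStep, hcont, hget]
          have hge1 : 1 ≤ (t.map Prod.snd).count kv.2 := List.one_le_count_iff.mpr hmem
          have hcnew : ((t ++ [kv]).map Prod.snd).count kv.2
              = (t.map Prod.snd).count kv.2 + 1 := by rw [pv_count_append]; simp
          rw [hfold, hstep]
          refine ⟨?_, ?_, ?_⟩
          · rw [ih1, List.filter_append]
            have h2 : [kv].filter (fun p => ((t ++ [kv]).map Prod.snd).count p.2 == 1) = [] := by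
              simp
              omega
            rw [h2, List.append_nil]
            apply List.filter_congr
            intro p hp
            by_cases hpv : p.2 = kv.2
            · have : ((t ++ [kv]).map Prod.snd).count p.2 = (t.map Prod.snd).count kv.2 + 1 := by
                rw [hpv]; exact hcnew
              simp [hpv, hc1]
              omega
            · have hz : List.count p.2 [kv.2] = 0 := List.count_eq_zero.mpr (by simpa using hpv)
              simp [hz]
          · intro v
            rw [ih2]
            by_cases hv : v = kv.2
            · subst hv
              simp [hmem]
            · simp only [List.map_append, List.map_cons, List.map_nil, List.mem_append,
                List.mem_singleton, Bool.decide_or]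
              rw [decide_eq_false hv]
              simp [Bool.or_comm]
          · intro v
            by_cases hv : v = kv.2
            · subst hv
              rw [ih3]
              simp [hc1]
              omega
            · have hcv : ((t ++ [kv]).map Prod.snd).count v = (t.map Prod.snd).count v := by
                rw [pv_count_append]; simp [Ne.symm hv]
              rw [ih3, hcv, pv_keyOf_append_of_ne t kv v (Ne.symm hv)]
      · -- value never seen: optimistic insert
        have hc0 : (t.map Prod.snd).count kv.2 = 0 := List.count_eq_zero.mpr hmem
        have hcont : s.2.contains kv.2 = false := by rw [ih2]; simpa using hmem
        have hstep : pvStep s kv = (s.1.insert kv.1 kv.2, s.2.insert kv.2 (some kv.1)) := by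
          simp [pvStep, hcont]
        have hcnew : ((t ++ [kv]).map Prod.snd).count kv.2 = 1 := by
          rw [pv_count_append]; simp [hc0]
        rw [hfold, hstep]
        refine ⟨?_, ?_, ?_⟩
        · have hnk : s.1.contains kv.1 = false := by
            rw [PySem.Dict.contains_eq_decide_mem_keys]
            simp only [PySem.Dict.keys, ih1, decide_eq_false_iff_not]
            intro hmemk
            obtain ⟨p, hp, hpk⟩ := List.mem_map.mp hmemk
            exact hk1 (hpk ▸ List.mem_map_of_mem (List.mem_of_mem_filter hp))
          rw [PySem.Dict.items_insert_of_not_contains _ _ hnk, ih1, List.filter_append]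
          have h2 : [kv].filter (fun p => ((t ++ [kv]).map Prod.snd).count p.2 == 1) = [kv] := by
            simp
            exact hc0
          rw [h2]
          congr 1
          apply List.filter_congr
          intro p hp
          have hpv : p.2 ≠ kv.2 := by
            intro he
            exact hmem (he ▸ List.mem_map_of_mem hp)
          have hz : List.count p.2 [kv.2] = 0 := List.count_eq_zero.mpr (by simpa using hpv)
          simp [hz]
        · intro v
          rw [PySem.Dict.contains_insert, ih2]
          by_cases hv : v = kv.2
          · subst hv
            simp
          · simp only [List.map_append, List.map_cons, List.map_nil, List.mem_append,
              List.mem_singleton, Bool.decide_or, Bool.beq_eq_decide_eq]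
            rw [decide_eq_false hv]
            simp [Bool.or_comm]
        · intro v
          rw [PySem.Dict.getD_insert]
          by_cases hv : v = kv.2
          · subst hv
            have hkey : pvKeyOf (t ++ [kv]) kv.2 = kv.1 := by
              have hnil : t.filter (fun p => p.2 == kv.2) = [] := by
                rw [List.filter_eq_nil_iff]
                intro p hp
                have hne : p.2 ≠ kv.2 := by
                  intro he
                  exact hmem (he ▸ List.mem_map_of_mem hp)
                simpa using hne
              simp [pvKeyOf, List.filter_append, hnil]
            simp [hkey, hc0]
          · have hcv : ((t ++ [kv]).map Prod.snd).count v = (t.map Prod.snd).count v := by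
              rw [pv_count_append]; simp [Ne.symm hv]
            rw [if_neg hv, ih3, hcv, pv_keyOf_append_of_ne t kv v (Ne.symm hv)]

-- ===== VERDICT (by name: the statement is the Claim_ definition above) =====
theorem removeDuplicateValues_spec : Claim_equal_removeDuplicateValues := by
  intro m _ hpre
  unfold Spec_removeDuplicateValues
  -- A's result dict is a plain insert-fold over the unique-valued entries
  have hA : (m.foldl
      (fun r kv =>
        if (m.foldl
          (fun c kv =>
            if c.contains kv.2 then c.insert kv.2 (c.getD kv.2 0 + 1) else c.insert kv.2 1)
          (PySem.Dict.empty : PySem.Dict String Int)).getD kv.2 0 == 1 then r.insert kv.1 kv.2 else r)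
      (PySem.Dict.empty : PySem.Dict String String))
      = (m.filter (fun kv => (m.map Prod.snd).count kv.2 == 1)).foldl
          (fun r kv => r.insert kv.1 kv.2) PySem.Dict.empty := by
    have hp : ∀ (r : PySem.Dict String String), ∀ kv ∈ m,
        (if (m.foldl
          (fun c kv =>
            if c.contains kv.2 then c.insert kv.2 (c.getD kv.2 0 + 1) else c.insert kv.2 1)
          (PySem.Dict.empty : PySem.Dict String Int)).getD kv.2 0 == 1 then r.insert kv.1 kv.2 else r)
        = (if ((m.map Prod.snd).count kv.2 == 1) then r.insert kv.1 kv.2 else r) := by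
      intro r kv _
      simp only [pv_counter_getD]
      by_cases hc : (m.map Prod.snd).count kv.2 = 1
      · simp [hc]
      · have h2 : ((m.map Prod.snd).count kv.2 : Int) ≠ 1 := by exact_mod_cast hc
        simp [hc, h2]
    rw [PySem.List.foldl_congr_mem m _ _ PySem.Dict.empty hp,
        pv_foldl_ite_filter (fun kv => (m.map Prod.snd).count kv.2 == 1)
          (fun r kv => r.insert kv.1 kv.2) m PySem.Dict.empty]
  -- …whose items are exactly the filtered list (fresh distinct keys append in order)
  have hfresh : ((m.filter (fun kv => (m.map Prod.snd).count kv.2 == 1)).foldl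
        (fun r kv => r.insert kv.1 kv.2) (PySem.Dict.empty : PySem.Dict String String)).items
      = m.filter (fun kv => (m.map Prod.snd).count kv.2 == 1) := by
    have hnd : ((m.filter (fun kv => (m.map Prod.snd).count kv.2 == 1)).map Prod.fst).Nodup :=
      hpre.sublist (List.Sublist.map Prod.fst List.filter_sublist)
    rw [PySem.Dict.items_foldl_insert_fresh _ _ _ _ (fun a _ => PySem.Dict.contains_empty _) hnd]
    simp [PySem.Dict.empty]
  have hAeq : removeDuplicateValues m
      = m.filter (fun kv => (m.map Prod.snd).count kv.2 == 1) := by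
    unfold removeDuplicateValues
    simp only []
    rw [hA]
    exact hfresh
  have hBeq : removeDuplicateValues_alt m
      = m.filter (fun kv => (m.map Prod.snd).count kv.2 == 1) := by
    have halt : removeDuplicateValues_alt m = (m.foldl pvStep pvInit).1.items := rfl
    rw [halt, (pv_inv m hpre).1]
  rw [hAeq, hBeq]
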